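-- pv_equiv track=rewrite | github.com/komi24/CMArkea | fonction_suite.py | build_all_configs_2
-- ===== SOURCE A (Python) =====
-- def build_config(n, host, ip_suffix, environment, service):
--     for i in range(1, n+1):
--         yield {
--             "host": host,
--             "environment": environment,
--             "service": service,
--             "ip": ip_suffix + str(i),
--         }
--
-- def build_all_configs_2(n):
--     host_list = ["mydb.com", "data.mydb.com", "ppe.mydb.com", "ppe.data.mydb.com"]
--     ip_suffix_list = ["189.175.1.", "189.175.2.", "189.175.3.", "189.175.4."]
--     service_list = ["website", "data services", "website", "data services"]
--     environment_list = ["prod", "prod", "ppe", "ppe"]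
--
--     liste_gen = []
--     for host, ip_suffix, service, environment in zip(host_list, ip_suffix_list, service_list, environment_list):
--         liste_gen.append(build_config(n, host, ip_suffix, environment, service))
--
--     for i in range(n):
--         for gen in liste_gen:
--             yield next(gen)
-- ===== SOURCE B (Python) =====
-- def build_all_configs_2(n):
--     host_list = ["mydb.com", "data.mydb.com", "ppe.mydb.com", "ppe.data.mydb.com"]
--     ip_suffix_list = ["189.175.1.", "189.175.2.", "189.175.3.", "189.175.4."]
--     service_list = ["website", "data services", "website", "data services"]
--     environment_list = ["prod", "prod", "ppe", "ppe"]
--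
--     for i in range(1, n + 1):
--         for host, ip_suffix, service, environment in zip(
--             host_list, ip_suffix_list, service_list, environment_list
--         ):
--             yield {
--                 "host": host,
--                 "environment": environment,
--                 "service": service,
--                 "ip": ip_suffix + str(i),
--             }
-- ===== Notes on version B (the rewrite author's own statement) =====
-- stated objective: simpler
-- what changed: Replaces the list of four generator objects and the round-robin next() scheduling loop with a single direct nested loop (ip index outside, hosts inside) that yields each dict immediately; no intermediate generators or consumption state.
import Mathlib
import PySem

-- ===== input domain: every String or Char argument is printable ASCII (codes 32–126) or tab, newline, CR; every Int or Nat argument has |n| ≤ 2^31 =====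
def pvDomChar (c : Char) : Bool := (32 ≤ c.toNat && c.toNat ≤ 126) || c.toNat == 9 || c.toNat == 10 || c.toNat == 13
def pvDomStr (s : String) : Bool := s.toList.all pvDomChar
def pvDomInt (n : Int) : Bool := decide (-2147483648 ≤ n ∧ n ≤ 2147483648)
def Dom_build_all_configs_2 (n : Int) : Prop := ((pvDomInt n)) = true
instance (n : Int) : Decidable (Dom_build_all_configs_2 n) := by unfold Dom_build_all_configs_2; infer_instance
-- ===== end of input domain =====

-- B replaces A's four generator objects and round-robin next() scheduling with one
-- direct nested loop (ip index outside, hosts inside); objective: simpler.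

-- ===== PORT A =====
-- next(gen) on a generator modelled as its remaining yield-list: pop the head
def pvNext {Out : Type} (q : List Out × List (List Out)) (g : List Out) :
    List Out × List (List Out) :=
  match g with
  | [] => q
  | x :: rest => (q.1 ++ [x], q.2 ++ [rest])

-- generator build_config(n, host, ip_suffix, environment, service) as the list of its yields
def build_config (n : Int) (host ip_suffix environment service : String) :
    List (List (String × String)) :=
  (PySem.List.pyRange 1 (n+1) 1).map (fun i =>
    [("host", host), ("environment", environment), ("service", service),
     ("ip", ip_suffix ++ PySem.Int.toStr i)])

def build_all_configs_2 (n : Int) : List (List (String × String)) :=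
  let host_list := ["mydb.com", "data.mydb.com", "ppe.mydb.com", "ppe.data.mydb.com"]
  let ip_suffix_list := ["189.175.1.", "189.175.2.", "189.175.3.", "189.175.4."]
  let service_list := ["website", "data services", "website", "data services"]
  let environment_list := ["prod", "prod", "ppe", "ppe"]
  -- for host, ip_suffix, service, environment in zip(...): liste_gen.append(build_config ...)
  let liste_gen :=
    (host_list.zip (ip_suffix_list.zip (service_list.zip environment_list))).foldl
      (fun acc r => acc ++ [build_config n r.1 r.2.1 r.2.2.2 r.2.2.1]) []
  -- for i in range(n): for gen in liste_gen: yield next(gen)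
  -- generators are their remaining yield-lists; next = pop the head (exhaustion is unreachable:
  -- each generator holds n items and is consumed once per each of the n rounds)
  ((PySem.List.pyRange 0 n 1).foldl
    (fun (st : List (List (String × String)) × List (List (List (String × String)))) _ =>
      st.2.foldl pvNext (st.1, []))
    ([], liste_gen)).1

-- ===== PORT B =====
def build_all_configs_2_alt (n : Int) : List (List (String × String)) :=
  let host_list := ["mydb.com", "data.mydb.com", "ppe.mydb.com", "ppe.data.mydb.com"]
  let ip_suffix_list := ["189.175.1.", "189.175.2.", "189.175.3.", "189.175.4."]
  let service_list := ["website", "data services", "website", "data services"]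
  let environment_list := ["prod", "prod", "ppe", "ppe"]
  (PySem.List.pyRange 1 (n+1) 1).flatMap (fun i =>
    (host_list.zip (ip_suffix_list.zip (service_list.zip environment_list))).map
      (fun r =>
        [("host", r.1), ("environment", r.2.2.2), ("service", r.2.2.1),
         ("ip", r.2.1 ++ PySem.Int.toStr i)]))

-- ===== PRECONDITION & SPEC =====
def Spec_build_all_configs_2 (n : Int) (out : List (List (String × String))) : Prop := out = build_all_configs_2_alt n
instance (n : Int) (out : List (List (String × String))) : Decidable (Spec_build_all_configs_2 n out) := by unfold Spec_build_all_configs_2; infer_instance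

-- ===== CLAIM (what is proved, stated in full; the proofs are below) =====
def Claim_equal_build_all_configs_2 : Prop := ∀ (n : Int), Dom_build_all_configs_2 n → Spec_build_all_configs_2 n (build_all_configs_2 n)

-- ===== LEMMAS AND PROOFS =====

-- A's round-robin consumption of four generators, each the map of f_k over the same
-- index list l, flattens to l.flatMap of one round, provided the outer loop runs
-- exactly l.length times.
theorem pv_rounds {Out : Type} (f1 f2 f3 f4 : Int → Out) :
    ∀ (l m : List Int), m.length = l.length → ∀ (acc : List Out),
    (m.foldl
      (fun (st : List Out × List (List Out)) _ => st.2.foldl pvNext (st.1, []))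
      (acc, [l.map f1, l.map f2, l.map f3, l.map f4])).1
    = acc ++ l.flatMap (fun i => [f1 i, f2 i, f3 i, f4 i]) := by
  intro l
  induction l with
  | nil =>
    intro m hm acc
    have : m = [] := List.eq_nil_of_length_eq_zero hm
    subst this
    simp
  | cons h t ih =>
    intro m hm acc
    cases m with
    | nil => simp at hm
    | cons mh mt =>
      have hm' : mt.length = t.length := by simpa using hm
      simp only [List.map_cons, List.foldl_cons, List.foldl_nil, pvNext, List.nil_append,
        List.append_assoc, List.cons_append]
      rw [ih mt hm' (acc ++ [f1 h, f2 h, f3 h, f4 h])]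
      simp

-- ===== VERDICT (by name: the statement is the Claim_ definition above) =====
theorem build_all_configs_2_spec : Claim_equal_build_all_configs_2 := by
  intro n _
  show build_all_configs_2 n = build_all_configs_2_alt n
  unfold build_all_configs_2 build_all_configs_2_alt build_config
  simp only [List.zip_cons_cons, List.zip_nil_right, List.foldl_cons, List.foldl_nil,
    List.nil_append, List.cons_append]
  rw [pv_rounds
    (fun i => [("host", "mydb.com"), ("environment", "prod"), ("service", "website"),
      ("ip", "189.175.1." ++ PySem.Int.toStr i)])
    (fun i => [("host", "data.mydb.com"), ("environment", "prod"), ("service", "data services"),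
      ("ip", "189.175.2." ++ PySem.Int.toStr i)])
    (fun i => [("host", "ppe.mydb.com"), ("environment", "ppe"), ("service", "website"),
      ("ip", "189.175.3." ++ PySem.Int.toStr i)])
    (fun i => [("host", "ppe.data.mydb.com"), ("environment", "ppe"), ("service", "data services"),
      ("ip", "189.175.4." ++ PySem.Int.toStr i)])
    (PySem.List.pyRange 1 (n+1) 1) (PySem.List.pyRange 0 n 1)
    (by simp [PySem.List.length_pyRange_one]) []]
  simp [List.flatMap]
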